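-- pv_equiv track=rewrite | github.com/mahirkabir/detecting-metadata-bugs | dataset-categorizer/keyword-file-commit-finder/keyword_file_commit_finder.py | get_keyword_rules
-- ===== SOURCE A (Python) =====
-- def merge(list1, list2):
--     """Merge two lists removing duplicates"""
--     dict = {}
--     for elm in list1: dict[elm] = True
--     for elm in list2: dict[elm] = True
--     res = []
--     for elm in dict: res.append(elm)
--     return res
--
-- def get_keyword_rules(keywords):
--     """Get the rules to run for the keywords"""
--     dict_keyword_rules = {
--         "@ImportResource": ["importXMLIntoAnnotation"],
--         "ApplicationContext": ["beanExists"],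
--         ".getBean(": ["beanExists"],
--         "<bean": ["beanClassExists", "dupBeansExist"],
--         "<property": ["setterMethod"],
--         "constructor-arg": ["constructorArgumentField", "constructorArgumentFieldType", "constructorIndexOutOfBound"],
--         "-method=": ["methodExists"],
--         "ClassPathXmlApplicationContext": ["xmlPathCheck"],
--         "org.junit": ["runwithNoTest"],
--         "@RunWith(": ["runwithNoTest", "runwithNoParameters", "suiteclassesNoRunwith"],
--         "@RunWith(Suite.class)": ["suiteclassesNoTest"],
--         "@Parameters": ["runwithNoParameters", "testParamsNotIterable", "runwithNoTest"],
--         "@Parameterized.Parameters": ["runwithNoParameters", "testParamsNotIterable", "runwithNoTest"]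
--     }
--
--     rules = []
--     for keyword in keywords:
--         if keyword in dict_keyword_rules:
--             keyword_rules = dict_keyword_rules[keyword]
--             rules = merge(rules, keyword_rules)
--
--     return rules
-- ===== SOURCE B (Python) =====
-- def get_keyword_rules(keywords):
--     """Get the rules to run for the keywords"""
--     dict_keyword_rules = {
--         "@ImportResource": ["importXMLIntoAnnotation"],
--         "ApplicationContext": ["beanExists"],
--         ".getBean(": ["beanExists"],
--         "<bean": ["beanClassExists", "dupBeansExist"],
--         "<property": ["setterMethod"],
--         "constructor-arg": ["constructorArgumentField", "constructorArgumentFieldType", "constructorIndexOutOfBound"],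
--         "-method=": ["methodExists"],
--         "ClassPathXmlApplicationContext": ["xmlPathCheck"],
--         "org.junit": ["runwithNoTest"],
--         "@RunWith(": ["runwithNoTest", "runwithNoParameters", "suiteclassesNoRunwith"],
--         "@RunWith(Suite.class)": ["suiteclassesNoTest"],
--         "@Parameters": ["runwithNoParameters", "testParamsNotIterable", "runwithNoTest"],
--         "@Parameterized.Parameters": ["runwithNoParameters", "testParamsNotIterable", "runwithNoTest"]
--     }
--     rules = []
--     seen = set()
--     for keyword in keywords:
--         for rule in dict_keyword_rules.get(keyword, []):
--             if rule not in seen: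
--                 seen.add(rule)
--                 rules.append(rule)
--     return rules
-- ===== Notes on version B (the rewrite author's own statement) =====
-- stated objective: simpler
-- what changed: Replaced the per-keyword merge helper (which rebuilds a dict from the whole accumulated rule list and the new rules on every match) by a single flat accumulation pass with one result list and one seen-set, appending each rule only on first sight.
import Mathlib
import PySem

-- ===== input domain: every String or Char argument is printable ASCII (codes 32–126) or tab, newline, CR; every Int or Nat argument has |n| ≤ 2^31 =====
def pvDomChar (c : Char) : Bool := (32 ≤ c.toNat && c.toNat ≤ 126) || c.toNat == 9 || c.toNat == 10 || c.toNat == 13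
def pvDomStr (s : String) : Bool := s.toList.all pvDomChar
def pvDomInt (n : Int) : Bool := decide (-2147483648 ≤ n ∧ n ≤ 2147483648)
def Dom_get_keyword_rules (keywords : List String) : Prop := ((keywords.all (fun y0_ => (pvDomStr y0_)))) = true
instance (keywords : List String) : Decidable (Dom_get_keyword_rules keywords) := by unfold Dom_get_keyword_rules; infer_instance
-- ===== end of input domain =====

-- B replaces A's per-keyword dict-rebuild merge over the whole accumulated list by one flat
-- accumulation pass with a result list and a seen-set (objective: simpler).

-- ===== PORT A =====
-- the shared literal rule table (a module-level constant of both programs)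
def pvTable : PySem.Dict String (List String) := PySem.Dict.ofList [
  ("@ImportResource", ["importXMLIntoAnnotation"]),
  ("ApplicationContext", ["beanExists"]),
  (".getBean(", ["beanExists"]),
  ("<bean", ["beanClassExists", "dupBeansExist"]),
  ("<property", ["setterMethod"]),
  ("constructor-arg", ["constructorArgumentField", "constructorArgumentFieldType", "constructorIndexOutOfBound"]),
  ("-method=", ["methodExists"]),
  ("ClassPathXmlApplicationContext", ["xmlPathCheck"]),
  ("org.junit", ["runwithNoTest"]),
  ("@RunWith(", ["runwithNoTest", "runwithNoParameters", "suiteclassesNoRunwith"]),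
  ("@RunWith(Suite.class)", ["suiteclassesNoTest"]),
  ("@Parameters", ["runwithNoParameters", "testParamsNotIterable", "runwithNoTest"]),
  ("@Parameterized.Parameters", ["runwithNoParameters", "testParamsNotIterable", "runwithNoTest"])]

-- merge(list1, list2): build a dict from list1 then list2, read the keys back out
def pvMerge (list1 list2 : List String) : List String :=
  let d : PySem.Dict String Bool := list1.foldl (fun d elm => d.insert elm true) PySem.Dict.empty
  let d := list2.foldl (fun d elm => d.insert elm true) d
  d.keys.foldl (fun res elm => res ++ [elm]) []

def get_keyword_rules (keywords : List String) : List String :=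
  keywords.foldl (fun rules keyword =>
    match pvTable.get? keyword with
    | some keyword_rules => pvMerge rules keyword_rules
    | none => rules) []

-- ===== PORT B =====
-- append each rule on first sight: state = (result list, seen set)
def pvAltStep (st : List String × PySem.Set String) (rule : String) : List String × PySem.Set String :=
  if rule ∈ st.2 then st else (st.1 ++ [rule], PySem.Set.add st.2 rule)

def get_keyword_rules_alt (keywords : List String) : List String :=
  (keywords.foldl (fun st keyword => (pvTable.getD keyword []).foldl pvAltStep st)
    (([], PySem.Set.empty) : List String × PySem.Set String)).1

-- ===== PRECONDITION & SPEC =====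
def Spec_get_keyword_rules (keywords : List String) (out : List String) : Prop := out = get_keyword_rules_alt keywords
instance (keywords : List String) (out : List String) : Decidable (Spec_get_keyword_rules keywords out) := by unfold Spec_get_keyword_rules; infer_instance

-- ===== CLAIM (what is proved, stated in full; the proofs are below) =====
def Claim_equal_get_keyword_rules : Prop := ∀ (keywords : List String), Dom_get_keyword_rules keywords → Spec_get_keyword_rules keywords (get_keyword_rules keywords)

-- ===== LEMMAS AND PROOFS =====

-- the common "append if unseen" fold both sides reduce to
def pvF (ks l : List String) : List String :=
  l.foldl (fun ks e => if e ∈ ks then ks else ks ++ [e]) ks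

theorem pvKeys_foldl_insert (l : List String) (d : PySem.Dict String Bool) :
    (l.foldl (fun d elm => d.insert elm true) d).keys = pvF d.keys l := by
  induction l generalizing d with
  | nil => rfl
  | cons e t ih =>
    simp only [List.foldl_cons, pvF, ih]
    by_cases h : e ∈ d.keys
    · rw [PySem.Dict.keys_insert_of_contains d true (by
        rw [PySem.Dict.contains_eq_decide_mem_keys]; simpa using h)]
      simp [h]
    · rw [PySem.Dict.keys_insert_of_not_contains d true (by
        rw [PySem.Dict.contains_eq_decide_mem_keys]; simpa using h)]
      simp [h]

theorem pvF_of_nodup_fresh (l : List String) : ∀ ks, l.Nodup → (∀ x ∈ l, x ∉ ks) →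
    pvF ks l = ks ++ l := by
  induction l with
  | nil => simp [pvF]
  | cons e t ih =>
    intro ks hnd hfresh
    have he : e ∉ ks := hfresh e (by simp)
    simp only [pvF, List.foldl_cons, if_neg he]
    have := ih (ks ++ [e]) hnd.of_cons (by
      intro x hx
      simp only [List.mem_append, List.mem_singleton]
      rintro (h | rfl)
      · exact hfresh x (by simp [hx]) h
      · exact (List.nodup_cons.mp hnd).1 hx)
    simp [pvF, List.append_assoc] at this ⊢
    exact this

theorem pvF_nodup (l : List String) : ∀ ks, ks.Nodup → (pvF ks l).Nodup := by
  induction l with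
  | nil => intro ks h; simpa [pvF] using h
  | cons e t ih =>
    intro ks h
    simp only [pvF, List.foldl_cons]
    by_cases he : e ∈ ks
    · simpa [pvF, he] using ih ks h
    · have hk : (ks ++ [e]).Nodup := by
        simp [List.nodup_append, h]
        intro a ha hae
        exact he (hae ▸ ha)
      simpa [pvF, he] using ih (ks ++ [e]) hk

theorem pvMerge_eq_pvF (l1 l2 : List String) (h : l1.Nodup) :
    pvMerge l1 l2 = pvF l1 l2 := by
  simp only [pvMerge]
  rw [pvKeys_foldl_insert, pvKeys_foldl_insert, PySem.List.foldl_append_singleton_eq_self]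
  have h1 : pvF (PySem.Dict.empty : PySem.Dict String Bool).keys l1 = l1 := by
    have := pvF_of_nodup_fresh l1 [] h (by simp)
    simpa [PySem.Dict.keys_empty] using this
  rw [h1]
  simp

theorem pvInner (l : List String) : ∀ (res : List String) (seen : PySem.Set String),
    (∀ x, x ∈ seen ↔ x ∈ res) →
    (l.foldl pvAltStep (res, seen)).1 = pvF res l ∧
    (∀ x, x ∈ (l.foldl pvAltStep (res, seen)).2 ↔ x ∈ (l.foldl pvAltStep (res, seen)).1) := by
  induction l with
  | nil => intro res seen hinv; exact ⟨rfl, hinv⟩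
  | cons r t ih =>
    intro res seen hinv
    simp only [List.foldl_cons, pvAltStep]
    by_cases hr : r ∈ seen
    · have hres : r ∈ res := (hinv r).mp hr
      simpa [pvF, hr, hres] using ih res seen hinv
    · have hres : r ∉ res := fun h => hr ((hinv r).mpr h)
      have hinv' : ∀ x, x ∈ PySem.Set.add seen r ↔ x ∈ res ++ [r] := by
        intro x
        rw [PySem.Set.mem_add]
        simp [hinv x, or_comm]
      simpa [pvF, hr, hres] using ih (res ++ [r]) (PySem.Set.add seen r) hinv'

theorem pvOuter (kws : List String) : ∀ (rules : List String) (seen : PySem.Set String),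
    rules.Nodup → (∀ x, x ∈ seen ↔ x ∈ rules) →
    kws.foldl (fun rules keyword =>
      match pvTable.get? keyword with
      | some keyword_rules => pvMerge rules keyword_rules
      | none => rules) rules =
    (kws.foldl (fun st keyword => (pvTable.getD keyword []).foldl pvAltStep st) (rules, seen)).1 := by
  induction kws with
  | nil => intro rules seen _ _; rfl
  | cons kw t ih =>
    intro rules seen hnd hinv
    simp only [List.foldl_cons]
    rcases hg : pvTable.get? kw with _ | kr
    · rw [PySem.Dict.getD_eq_get?_getD]
      simp only [hg, Option.getD_none]
      simpa using ih rules seen hnd hinv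
    · rw [PySem.Dict.getD_eq_get?_getD]
      simp only [hg, Option.getD_some]
      obtain ⟨h1, h2⟩ := pvInner kr rules seen hinv
      rw [pvMerge_eq_pvF rules kr hnd]
      have hnd' : (pvF rules kr).Nodup := pvF_nodup kr rules hnd
      have := ih (kr.foldl pvAltStep (rules, seen)).1 (kr.foldl pvAltStep (rules, seen)).2
        (h1 ▸ hnd') h2
      rw [Prod.mk.eta] at this
      rw [h1] at this
      exact this

-- ===== VERDICT (by name: the statement is the Claim_ definition above) =====
theorem get_keyword_rules_spec : Claim_equal_get_keyword_rules := by
  intro keywords _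
  unfold Spec_get_keyword_rules get_keyword_rules get_keyword_rules_alt
  exact pvOuter keywords [] PySem.Set.empty (by simp) (by simp [PySem.Set.empty])
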